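-- pv_equiv track=rewrite | github.com/ik48655/Introduction-to-programming | Drugi kolokvij, prvi rok 2017/E 1 OBRNUTO.py | funkye12
-- ===== SOURCE A (Python) =====
-- def funkye12(lst1,lst2):
--     nova=[]
--     brojac=0
--     for i in range(len(lst2)):
--         if lst2[i]==True:
--             brojac+=1
--         if brojac == 1 or (brojac<=2 and lst2[i]==True):
--             nova.append(lst1[i])
--     return nova
-- ===== SOURCE B (Python) =====
-- def funkye12(lst1, lst2):
--     # positions of strict True flags
--     trues = [i for i in range(len(lst2)) if lst2[i] == True]
--     if not trues:
--         return []
--     first = trues[0]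
--     stop = trues[1] + 1 if len(trues) > 1 else len(lst2)
--     return [lst1[i] for i in range(first, stop)]
-- ===== Notes on version B (the rewrite author's own statement) =====
-- stated objective: simpler
-- what changed: B replaces A's running-counter loop (which decides element by element whether the True-count is 1, or at most 2 on a True position) by first collecting the indices of the True flags and then producing lst1[first..second] (or lst1[first..end of lst2] if only one True) directly by index.
import Mathlib
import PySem

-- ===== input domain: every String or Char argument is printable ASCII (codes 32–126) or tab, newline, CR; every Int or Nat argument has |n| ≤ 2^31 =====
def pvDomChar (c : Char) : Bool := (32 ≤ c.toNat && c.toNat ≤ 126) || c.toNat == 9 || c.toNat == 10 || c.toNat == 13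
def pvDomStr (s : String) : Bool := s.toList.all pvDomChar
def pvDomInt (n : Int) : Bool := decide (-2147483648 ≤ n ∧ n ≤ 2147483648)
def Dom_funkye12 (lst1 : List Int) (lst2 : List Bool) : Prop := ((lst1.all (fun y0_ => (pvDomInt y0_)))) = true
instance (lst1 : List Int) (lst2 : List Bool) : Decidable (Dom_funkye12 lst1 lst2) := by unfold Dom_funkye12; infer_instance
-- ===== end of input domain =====

-- B collects the True-flag indices once and returns lst1[first..second] (to end if only one
-- True) directly, instead of A's running counter deciding membership element by element;
-- objective: simpler.

-- ===== PORT A =====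
-- loop body of A; lst2.getD i false is lst2[i] (i < len(lst2) always holds here), and
-- lst1.getD i 0 is lst1[i], in range under Pre_funkye12 (outside Pre_ Python raises IndexError)
def stepA (lst1 : List Int) (lst2 : List Bool) (st : List Int × Int) (i : Nat) : List Int × Int :=
  let brojac : Int := if lst2.getD i false = true then st.2 + 1 else st.2
  let nova : List Int :=
    if brojac = 1 ∨ (brojac ≤ 2 ∧ lst2.getD i false = true) then st.1 ++ [lst1.getD i 0] else st.1
  (nova, brojac)

def funkye12 (lst1 : List Int) (lst2 : List Bool) : List Int :=
  ((List.range lst2.length).foldl (stepA lst1 lst2) ([], 0)).1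

-- ===== PORT B =====
def funkye12_alt (lst1 : List Int) (lst2 : List Bool) : List Int :=
  let trues := (List.range lst2.length).filter (fun i => lst2.getD i false == true)
  match trues with
  | [] => []
  | first :: rest =>
      let stop : Nat := match rest with
        | second :: _ => second + 1
        | [] => lst2.length
      (List.range' first (stop - first)).map (fun i => lst1.getD i 0)

-- ===== PRECONDITION & SPEC =====
-- Pre_ excludes exactly the inputs on which Python A raises IndexError: those where lst1 is
-- shorter than the index range selected by lst2's True flags (A returns no value there).
def Pre_funkye12 (lst1 : List Int) (lst2 : List Bool) : Prop :=
  let trues := (List.range lst2.length).filter (fun i => lst2.getD i false == true)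
  trues = [] ∨ (if trues.length ≤ 1 then lst2.length else trues.getD 1 0 + 1) ≤ lst1.length

instance (lst1 : List Int) (lst2 : List Bool) : Decidable (Pre_funkye12 lst1 lst2) := by
  unfold Pre_funkye12; infer_instance

def pvWitness_funkye12 : List Int × List Bool := ([1, 2, 3], [false, true, false])

def Spec_funkye12 (lst1 : List Int) (lst2 : List Bool) (out : List Int) : Prop := out = funkye12_alt lst1 lst2
instance (lst1 : List Int) (lst2 : List Bool) (out : List Int) : Decidable (Spec_funkye12 lst1 lst2 out) := by unfold Spec_funkye12; infer_instance

-- ===== CLAIM (what is proved, stated in full; the proofs are below) =====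
def Claim_equal_funkye12 : Prop := ∀ (lst1 : List Int) (lst2 : List Bool), Dom_funkye12 lst1 lst2 → Pre_funkye12 lst1 lst2 → Spec_funkye12 lst1 lst2 (funkye12 lst1 lst2)

-- ===== LEMMAS AND PROOFS =====

def F (bs : List Bool) : List Nat :=
  (List.range bs.length).filter (fun i => bs.getD i false == true)
lemma F_cons (b : Bool) (bs : List Bool) :
    F (b :: bs) = (if b then [0] else []) ++ (F bs).map (· + 1) := by
  unfold F
  rw [List.length_cons, show List.range (bs.length + 1) = 0 :: (List.range bs.length).map (· + 1) by
        simpa using List.range_succ_eq_map (n := bs.length)]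
  rw [List.filter_cons, List.filter_map]
  have h : ((fun i => (b :: bs).getD i false == true) ∘ fun x => x + 1)
      = (fun i => bs.getD i false == true) := by
    funext i; simp [Function.comp]
  rw [h]
  cases b <;> simp
def goA (l1 : List Int) (bs : List Bool) (c : Int) : List Int :=
  match bs with
  | [] => []
  | b :: bs' =>
      let c' : Int := if b = true then c + 1 else c
      (if c' = 1 ∨ (c' ≤ 2 ∧ b = true) then [l1.getD 0 0] else []) ++ goA l1.tail bs' c'
lemma getD_succ_tail (l1 : List Int) (i : Nat) : l1.getD (i + 1) 0 = l1.tail.getD i 0 := by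
  cases l1 <;> simp
lemma goA_ge_two : ∀ (bs : List Bool) (l1 : List Int) (c : Int), 2 ≤ c → goA l1 bs c = [] := by
  intro bs
  induction bs with
  | nil => intro l1 c _; simp [goA]
  | cons b bs' ih =>
      intro l1 c hc
      simp only [goA]
      cases b
      · simp only [Bool.false_eq_true, if_false]
        rw [if_neg (by simp; omega), ih _ _ hc]; simp
      · rw [if_pos rfl, if_neg (by simp; omega), ih _ _ (by omega)]; simp
lemma map_getD_shift (l1 : List Int) (f n : Nat) :
    (List.range' (f + 1) n).map (fun i => l1.getD i 0)
      = (List.range' f n).map (fun i => l1.tail.getD i 0) := by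
  rw [List.range'_succ_left, List.map_map]
  exact List.map_congr_left fun i _ => getD_succ_tail l1 i

lemma cons_shift (l1 : List Int) (m : Nat) :
    l1.getD 0 0 :: (List.range' 0 m).map (fun i => l1.tail.getD i 0)
      = (List.range' 0 (m + 1)).map (fun i => l1.getD i 0) := by
  rw [List.range'_succ, List.map_cons, map_getD_shift]

lemma goA_one :
    ∀ (bs : List Bool) (l1 : List Int),
      goA l1 bs 1
        = (List.range' 0 (match F bs with | s :: _ => s + 1 | [] => bs.length)).map
            (fun i => l1.getD i 0) := by
  intro bs
  induction bs with
  | nil => intro l1; simp [goA, F]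
  | cons b bs' ih =>
      intro l1
      rw [F_cons]
      cases b
      · -- head False: counter stays 1, element appended, recurse
        simp only [goA, Bool.false_eq_true, if_false, List.nil_append]
        rw [if_pos (by norm_num), ih]
        have hm : (match (F bs').map (· + 1) with | s :: _ => s + 1 | [] => (false :: bs').length)
            = (match F bs' with | s :: _ => s + 1 | [] => bs'.length) + 1 := by
          cases F bs' <;> simp
        rw [hm, List.range'_succ, List.map_cons, map_getD_shift]
        simp
      · -- head True: counter becomes 2, element appended, nothing afterwards
        simp only [goA]
        rw [if_pos trivial, if_pos (by norm_num), goA_ge_two bs' l1.tail (1 + 1) (by norm_num)]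
        simp [List.range'_succ]

lemma goA_zero :
    ∀ (bs : List Bool) (l1 : List Int),
      goA l1 bs 0
        = match F bs with
          | [] => []
          | first :: rest =>
              (List.range' first
                  ((match rest with | second :: _ => second + 1 | [] => bs.length) - first)).map
                (fun i => l1.getD i 0) := by
  intro bs
  induction bs with
  | nil => intro l1; simp [goA, F]
  | cons b bs' ih =>
      intro l1
      rw [F_cons]
      cases b
      · -- head False: counter stays 0, nothing appended, recurse; indices shift by one
        simp only [goA, Bool.false_eq_true, if_false, List.nil_append]
        rw [if_neg (by norm_num), ih]
        cases hF : F bs' with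
        | nil => simp
        | cons f rest =>
            cases rest with
            | nil =>
                simp only [List.map_cons, List.map_nil, List.length_cons, List.nil_append,
                  Nat.succ_sub_succ]
                rw [map_getD_shift]
            | cons s rest' =>
                simp only [List.map_cons, List.nil_append]
                rw [show s + 1 + 1 - (f + 1) = s + 1 - f from by omega, map_getD_shift]
      · -- head True: counter becomes 1, element appended, continue in state 1
        simp only [goA]
        rw [if_pos trivial, if_pos (by norm_num), show (0 : Int) + 1 = 1 from rfl, goA_one,
            if_pos trivial, List.singleton_append]
        cases hF : F bs' with
        | nil => simpa using cons_shift l1 bs'.length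
        | cons s rest => simpa using cons_shift l1 (s + 1)
lemma stepA_succ (l1 : List Int) (b : Bool) (bs : List Bool) (st : List Int × Int) (i : Nat) :
    stepA l1 (b :: bs) st (i + 1) = stepA l1.tail bs st i := by
  simp [stepA]

lemma foldl_stepA :
    ∀ (bs : List Bool) (l1 acc : List Int) (c : Int),
      (List.range bs.length).foldl (stepA l1 bs) (acc, c)
        = (acc ++ goA l1 bs c, c + (bs.count true : Int)) := by
  intro bs
  induction bs with
  | nil => intro l1 acc c; simp [goA]
  | cons b bs' ih =>
      intro l1 acc c
      rw [List.length_cons, show List.range (bs'.length + 1) = 0 :: (List.range bs'.length).map (· + 1) by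
            simpa using List.range_succ_eq_map (n := bs'.length)]
      rw [List.foldl_cons, List.foldl_map]
      have hfun : (fun (st : List Int × Int) (i : Nat) => stepA l1 (b :: bs') st (i + 1))
          = stepA l1.tail bs' := by
        funext st i; exact stepA_succ l1 b bs' st i
      rw [hfun]
      have hstep : stepA l1 (b :: bs') (acc, c) 0
          = (acc ++ (if (if b = true then c + 1 else c) = 1 ∨
                        ((if b = true then c + 1 else c) ≤ 2 ∧ b = true)
                     then [l1.getD 0 0] else []),
             if b = true then c + 1 else c) := by
        simp only [stepA, List.getD_cons_zero]
        split_ifs <;> simp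
      rw [hstep, ih]
      simp only [goA, Prod.mk.injEq]
      refine ⟨List.append_assoc _ _ _, ?_⟩
      cases b <;> simp [Int.add_comm, Int.add_left_comm]

lemma A_eq_goA (l1 : List Int) (bs : List Bool) : funkye12 l1 bs = goA l1 bs 0 := by
  unfold funkye12
  rw [foldl_stepA bs l1 [] 0]
  simp

lemma B_eq_goA (l1 : List Int) (bs : List Bool) : funkye12_alt l1 bs = goA l1 bs 0 := by
  rw [goA_zero]
  unfold funkye12_alt
  have h : (List.range bs.length).filter (fun i => bs.getD i false == true) = F bs := rfl
  rw [h]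

-- ===== VERDICT (by name: the statement is the Claim_ definition above) =====
theorem funkye12_spec : Claim_equal_funkye12 := by
  intro lst1 lst2 _dom _pre
  unfold Spec_funkye12
  rw [A_eq_goA, B_eq_goA]
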